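-- pv_equiv track=rewrite | github.com/rulecoconuts/algo_learn | b_tree/class_skeleton_to_tldr_frame.py | group_code
-- ===== SOURCE A (Python) =====
-- from typing import Optional
--
-- def handle_comment(line: str) -> tuple[Optional[str], bool]:
--     content = line.removeprefix('///').strip()
--     space_split_parts = content.split(' ')
--     should_start_new_group = False
--     line_to_be_added = None
--
--     if content.startswith('@param') and len(space_split_parts) > 2:
--         # param contains description
--         line_to_be_added = line
--     elif content.startswith('@brief') and len(space_split_parts) > 1:
--         line_to_be_added = '/// ' + content.removeprefix('@brief').strip()
--     elif content.startswith('@return') and len(space_split_parts) > 1: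
--         main_out = content.removeprefix('@return').strip()
--         line_to_be_added = '/// ' + 'Return ' + main_out[0].lower() + main_out[1:]
--     elif (not content.startswith("@")) and len(content) > 1:
--         line_to_be_added = line
--
--     return line_to_be_added, should_start_new_group
--
-- def handle_method_declaration(line: str) -> tuple[Optional[str], bool]:
--     return line.removesuffix(';'), True
--
-- def handle_inline_defined_method(line: str) -> tuple[Optional[str], bool]:
--     return line, True
--
-- def handle_stray_curly(line: str) -> tuple[Optional[str], bool]:
--     return None, False
--
-- def handle_field(line: str) -> tuple[Optional[str], bool]:
--     return line.removesuffix(";"), True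
--
-- def handle_misc(line: str) -> tuple[Optional[str], bool]:
--     return None, False
--
-- def group_code(rawCode: list[str]) -> list[list[str]]:
--     '''Group code elements and their descriptions together'''
--
--     # any line will be one of the following cases:
--     #   - blank line (ignore)
--     #   - comment. Starts with '///'
--     #       - followed by '@param' (ignore if there is no description after the parameter name)
--     #       - followed by '@brief' (remove '@brief' and add the rest to group)
--     #       - followed by '@return' (remove '@' and add the rest to group if not empty)
--     #       - followed by empty space (ignore)
--     #       - followed by text without annotation
--     #   - method declaration. Ends with ');' or 'const;' (add to current group and start a new group)
--     #   - inline defined method. Ends with ')' (add to current group and start a new group)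
--     #   - stray curly brace. Ends with '{', '}' or '};' (ignore)
--     #   - field/property. Ends with just ';' (add to current group and start new group)
--     #   - anything else (ignore)
--
--     current_group:list[str]=[]
--     groups:list[list[str]] = []
--
--     for rawLine in rawCode:
--         line = rawLine.strip()
--         should_start_new_group = False
--         line_to_be_added = None
--
--         if line.startswith('///'):
--             line_to_be_added, should_start_new_group = handle_comment(line)
--         elif line.endswith(');') or line.endswith('const;'):
--             line_to_be_added, should_start_new_group = handle_method_declaration(line)
--         elif line.endswith(')'):
--             line_to_be_added, should_start_new_group = handle_inline_defined_method(line)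
--         elif line.endswith('{') or line.endswith('}') or line.endswith('};'):
--             line_to_be_added, should_start_new_group = handle_stray_curly(line)
--         elif  line.endswith(';'):
--             line_to_be_added, should_start_new_group = handle_field(line)
--         else:
--             line_to_be_added, should_start_new_group = handle_misc(line)
--
--         if line_to_be_added is not None:
--             current_group.append(line_to_be_added)
--
--         if should_start_new_group:
--             groups.append(current_group)
--             current_group = []
--
--     return groups
-- ===== SOURCE B (Python) =====
-- from typing import Optional
--
--
-- def _classify(line: str) -> tuple[Optional[str], bool]:
--     """Map one stripped line to (line_to_add_or_None, flush_flag)."""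
--     if line.startswith('///'):
--         content = line.removeprefix('///').strip()
--         parts = content.split(' ')
--         if content.startswith('@'):
--             if content.startswith('@param') and len(parts) > 2:
--                 return line, False
--             if content.startswith('@brief') and len(parts) > 1:
--                 return '/// ' + content.removeprefix('@brief').strip(), False
--             if content.startswith('@return') and len(parts) > 1:
--                 main_out = content.removeprefix('@return').strip()
--                 return '/// ' + 'Return ' + main_out[0].lower() + main_out[1:], False
--             return None, False
--         return (line if len(content) > 1 else None), False
--     if line.endswith('}') or line.endswith('{') or line.endswith('};'):
--         return None, False
--     if line.endswith(';'):
--         return line.removesuffix(';'), True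
--     if line.endswith(')'):
--         return line, True
--     return None, False
--
--
-- def _split_groups(stream: list) -> list:
--     """Split the flat token stream on None separators, dropping the trailing
--     unterminated segment."""
--     groups = []
--     while None in stream:
--         i = stream.index(None)
--         groups.append(stream[:i])
--         stream = stream[i + 1:]
--     return groups
--
--
-- def group_code(rawCode: list) -> list:
--     stream = []
--     for raw in rawCode:
--         opt, flush = _classify(raw.strip())
--         if opt is not None:
--             stream.append(opt)
--         if flush:
--             stream.append(None)
--     return _split_groups(stream)
-- ===== Notes on version B (the rewrite author's own statement) =====
-- stated objective: alternative
-- what changed: B separates classification from accumulation: a pure per-line classifier with a restructured branch cascade (curly-brace check first, the three ';'-ending cases merged into one removesuffix branch, comment sub-rules nested under a single '@' test) emits a flat token stream with None as group separator, which an index/slice splitter then cuts into groups, dropping the trailing unterminated segment; A instead threads current_group/groups mutable state through one loop over six helper functions.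
import Mathlib
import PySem

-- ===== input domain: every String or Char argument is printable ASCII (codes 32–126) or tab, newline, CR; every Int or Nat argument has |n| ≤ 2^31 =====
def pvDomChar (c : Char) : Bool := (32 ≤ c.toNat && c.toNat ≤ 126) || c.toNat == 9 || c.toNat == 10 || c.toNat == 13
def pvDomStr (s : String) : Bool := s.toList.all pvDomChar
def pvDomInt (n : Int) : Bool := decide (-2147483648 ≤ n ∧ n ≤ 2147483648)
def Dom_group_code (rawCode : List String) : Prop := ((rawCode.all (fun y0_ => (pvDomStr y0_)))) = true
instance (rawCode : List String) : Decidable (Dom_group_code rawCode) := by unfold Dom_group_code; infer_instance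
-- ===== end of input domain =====

-- B re-decomposes A as classify-, then flat token stream, then split on separators: an
-- alternative decomposition of the same cost (objective: alternative, not faster).

-- str.removeprefix / str.removesuffix (not in PySem): exact  transliterations
def pyRemoveprefix (s p : String) : String :=
  if PySem.Str.startswith s p then String.ofList (s.toList.drop p.toList.length) else s

def pyRemovesuffix (s p : String) : String :=
  if PySem.Str.endswith s p then String.ofList (s.toList.take (s.toList.length - p.toList.length)) else s

-- ===== PORT A =====
def handle_comment (line : String) : Option String × Bool :=
  let content := PySem.Str.strip (pyRemoveprefix line "///")
  -- content.split(' '): sep ≠ "" so split? is always some; getD is never the default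
  let space_split_parts := (PySem.Str.split? content " ").getD []
  if PySem.Str.startswith content "@param" && decide (space_split_parts.length > 2) then
    (some line, false)
  else if PySem.Str.startswith content "@brief" && decide (space_split_parts.length > 1) then
    (some ("/// " ++ PySem.Str.strip (pyRemoveprefix content "@brief")), false)
  else if PySem.Str.startswith content "@return" && decide (space_split_parts.length > 1) then
    -- main_out[0].lower() + main_out[1:] rendered with one-char slices; main_out is provably
    -- nonempty in this branch (content is stripped and contains a space past '@return'),
    -- so this is exact wherever Python returns (IndexError is unreachable)
    let main_out := PySem.Str.strip (pyRemoveprefix content "@return")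
    (some ("/// " ++ "Return " ++ PySem.Str.lower (PySem.Str.slice main_out (some 0) (some 1))
            ++ PySem.Str.slice main_out (some 1) none), false)
  else if !(PySem.Str.startswith content "@") && decide (PySem.Str.len content > 1) then
    (some line, false)
  else (none, false)

def handle_method_declaration (line : String) : Option String × Bool :=
  (some (pyRemovesuffix line ";"), true)

def handle_inline_defined_method (line : String) : Option String × Bool :=
  (some line, true)

def handle_stray_curly (_line : String) : Option String × Bool :=
  (none, false)

def handle_field (line : String) : Option String × Bool :=
  (some (pyRemovesuffix line ";"), true)

def handle_misc (_line : String) : Option String × Bool :=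
  (none, false)

def group_code (rawCode : List String) : List (List String) :=
  (rawCode.foldl (fun st rawLine =>
    let line := PySem.Str.strip rawLine
    let r :=
      if PySem.Str.startswith line "///" then handle_comment line
      else if PySem.Str.endswith line ");" || PySem.Str.endswith line "const;" then
        handle_method_declaration line
      else if PySem.Str.endswith line ")" then handle_inline_defined_method line
      else if PySem.Str.endswith line "{" || PySem.Str.endswith line "}"
              || PySem.Str.endswith line "};" then handle_stray_curly line
      else if PySem.Str.endswith line ";" then handle_field line
      else handle_misc line
    let current_group := match r.1 with | some l => st.1 ++ [l] | none => st.1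
    if r.2 then (([] : List String), st.2 ++ [current_group]) else (current_group, st.2))
    (([] : List String), ([] : List (List String)))).2

-- ===== PORT B =====
def classifyLine (line : String) : Option String × Bool :=
  if PySem.Str.startswith line "///" then
    let content := PySem.Str.strip (pyRemoveprefix line "///")
    let parts := (PySem.Str.split? content " ").getD []
    if PySem.Str.startswith content "@" then
      if PySem.Str.startswith content "@param" && decide (parts.length > 2) then
        (some line, false)
      else if PySem.Str.startswith content "@brief" && decide (parts.length > 1) then
        (some ("/// " ++ PySem.Str.strip (pyRemoveprefix content "@brief")), false)
      else if PySem.Str.startswith content "@return" && decide (parts.length > 1) then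
        let main_out := PySem.Str.strip (pyRemoveprefix content "@return")
        (some ("/// " ++ "Return " ++ PySem.Str.lower (PySem.Str.slice main_out (some 0) (some 1))
                ++ PySem.Str.slice main_out (some 1) none), false)
      else (none, false)
    else ((if decide (PySem.Str.len content > 1) then some line else none), false)
  else if PySem.Str.endswith line "}" || PySem.Str.endswith line "{"
          || PySem.Str.endswith line "};" then (none, false)
  else if PySem.Str.endswith line ";" then (some (pyRemovesuffix line ";"), true)
  else if PySem.Str.endswith line ")" then (some line, true)
  else (none, false)

-- stream.index(None) / stream[:i] / stream[i+1:]: all-nonnegative indices, rendered exactly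
-- as idxOf / take / drop; the chunk before the first None contains only `some`s, which
-- reduceOption unwraps (Python's slice already holds the bare strings)
def splitGroups (s : List (Option String)) : List (List String) :=
  if h : (none : Option String) ∈ s then
    (s.take (s.idxOf none)).reduceOption :: splitGroups (s.drop (s.idxOf none + 1))
  else []
termination_by s.length
decreasing_by
  have hne : s ≠ [] := List.ne_nil_of_mem h
  have : 0 < s.length := List.length_pos_iff.mpr hne
  simp
  omega

def group_code_alt (rawCode : List String) : List (List String) :=
  splitGroups (rawCode.foldl (fun stream raw =>
    let r := classifyLine (PySem.Str.strip raw)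
    stream ++ ((match r.1 with | some l => [some l] | none => [])
               ++ (if r.2 then [(none : Option String)] else []))) [])

-- ===== PRECONDITION & SPEC =====
def Spec_group_code (rawCode : List String) (out : List (List String)) : Prop := out = group_code_alt rawCode
instance (rawCode : List String) (out : List (List String)) : Decidable (Spec_group_code rawCode out) := by unfold Spec_group_code; infer_instance

-- ===== CLAIM (what is proved, stated in full; the proofs are below) =====
def Claim_equal_group_code : Prop := ∀ (rawCode : List String), Dom_group_code rawCode → Spec_group_code rawCode (group_code rawCode)

-- ===== LEMMAS AND PROOFS =====

-- the per-line token contribution of B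
def entryTok (raw : String) : List (Option String) :=
  let r := classifyLine (PySem.Str.strip raw)
  (match r.1 with | some l => [some l] | none => [])
    ++ (if r.2 then [(none : Option String)] else [])

-- A's accumulation, phrased on the token stream
def consume : List String → List (Option String) → List (List String)
  | _, [] => []
  | cur, none :: t => cur :: consume [] t
  | cur, some x :: t => consume (cur ++ [x]) t

def prependFirst (cur : List String) : List (List String) → List (List String)
  | [] => []
  | g :: gs => (cur ++ g) :: gs

lemma ew_of_ew (line p q : String) (h : p.toList <:+ q.toList)
    (hq : PySem.Str.endswith line q = true) : PySem.Str.endswith line p = true := by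
  simp only [PySem.Str.endswith_eq, PySem.Chars.endswith_iff] at *
  exact h.trans hq

lemma ew_not (line p q : String) (hlen : p.toList.length = q.toList.length)
    (hne : p.toList ≠ q.toList)
    (hq : PySem.Str.endswith line q = true) : PySem.Str.endswith line p = false := by
  simp only [PySem.Str.endswith_eq, PySem.Chars.endswith_iff] at *
  rw [Bool.eq_false_iff]
  intro hp
  rw [PySem.Chars.endswith_iff] at hp
  obtain ⟨a, ha⟩ := hp
  obtain ⟨b, hb⟩ := hq
  have habs : a ++ p.toList = b ++ q.toList := ha.trans hb.symm
  have hl : a.length = b.length := by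
    have h2 := congrArg List.length habs
    rw [List.length_append, List.length_append] at h2
    omega
  exact hne (List.append_inj habs hl).2

lemma sw_of_sw (s p q : String) (h : p.toList <+: q.toList)
    (hq : PySem.Str.startswith s q = true) : PySem.Str.startswith s p = true := by
  simp only [PySem.Str.startswith_eq, PySem.Chars.startswith_iff] at *
  exact h.trans hq

-- A's dispatch = B's classifier, line by line
lemma stepEq (line : String) :
    (if PySem.Str.startswith line "///" then handle_comment line
     else if PySem.Str.endswith line ");" || PySem.Str.endswith line "const;" then
       handle_method_declaration line
     else if PySem.Str.endswith line ")" then handle_inline_defined_method line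
     else if PySem.Str.endswith line "{" || PySem.Str.endswith line "}"
             || PySem.Str.endswith line "};" then handle_stray_curly line
     else if PySem.Str.endswith line ";" then handle_field line
     else handle_misc line) = classifyLine line := by
  by_cases h0 : PySem.Str.startswith line "///" = true
  · rw [if_pos h0]
    unfold handle_comment classifyLine
    rw [if_pos h0]
    generalize PySem.Str.strip (pyRemoveprefix line "///") = content
    by_cases hAt : PySem.Str.startswith content "@" = true
    · simp only [hAt, Bool.not_true, Bool.false_and, if_true,
        Bool.false_eq_true, if_false]
    · have hp : PySem.Str.startswith content "@param" = false := by
        rw [Bool.eq_false_iff]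
        intro hc
        exact absurd (sw_of_sw content "@" "@param" (by decide) hc) (by simpa using hAt)
      have hb : PySem.Str.startswith content "@brief" = false := by
        rw [Bool.eq_false_iff]
        intro hc
        exact absurd (sw_of_sw content "@" "@brief" (by decide) hc) (by simpa using hAt)
      have hret : PySem.Str.startswith content "@return" = false := by
        rw [Bool.eq_false_iff]
        intro hc
        exact absurd (sw_of_sw content "@" "@return" (by decide) hc) (by simpa using hAt)
      rw [Bool.not_eq_true] at hAt
      simp at hAt hp hb hret
      by_cases hl : 1 < content.length <;>
        simp [hAt, hp, hb, hret, hl]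
  · rw [Bool.not_eq_true] at h0
    rw [if_neg (show ¬ PySem.Str.startswith line "///" = true by simpa using h0)]
    unfold classifyLine
    rw [if_neg (show ¬ PySem.Str.startswith line "///" = true by simpa using h0)]
    unfold handle_method_declaration handle_inline_defined_method handle_stray_curly
      handle_field handle_misc
    by_cases h2 : PySem.Str.endswith line ");" = true
    · have hsemi : PySem.Str.endswith line ";" = true := ew_of_ew line ";" ");" (by decide) h2
      have hc1 : PySem.Str.endswith line "}" = false := ew_not line "}" ";" (by decide) (by decide) hsemi
      have hc2 : PySem.Str.endswith line "{" = false := ew_not line "{" ";" (by decide) (by decide) hsemi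
      have hc3 : PySem.Str.endswith line "};" = false := ew_not line "};" ");" (by decide) (by decide) h2
      simp at h2 hsemi hc1 hc2 hc3
      simp [h2, hsemi, hc1, hc2, hc3]
    · rw [Bool.not_eq_true] at h2
      by_cases h2b : PySem.Str.endswith line "const;" = true
      · have hsemi : PySem.Str.endswith line ";" = true := ew_of_ew line ";" "const;" (by decide) h2b
        have ht : PySem.Str.endswith line "t;" = true := ew_of_ew line "t;" "const;" (by decide) h2b
        have hc1 : PySem.Str.endswith line "}" = false := ew_not line "}" ";" (by decide) (by decide) hsemi
        have hc2 : PySem.Str.endswith line "{" = false := ew_not line "{" ";" (by decide) (by decide) hsemi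
        have hc3 : PySem.Str.endswith line "};" = false := ew_not line "};" "t;" (by decide) (by decide) ht
        simp at h2 h2b hsemi hc1 hc2 hc3
        simp [h2, h2b, hsemi, hc1, hc2, hc3]
      · rw [Bool.not_eq_true] at h2b
        by_cases h3 : PySem.Str.endswith line ")" = true
        · have hsemif : PySem.Str.endswith line ";" = false := ew_not line ";" ")" (by decide) (by decide) h3
          have hc1 : PySem.Str.endswith line "}" = false := ew_not line "}" ")" (by decide) (by decide) h3
          have hc2 : PySem.Str.endswith line "{" = false := ew_not line "{" ")" (by decide) (by decide) h3
          have hc3 : PySem.Str.endswith line "};" = false := by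
            rw [Bool.eq_false_iff]
            intro hx
            exact absurd (ew_of_ew line ";" "};" (by decide) hx) (by simpa using hsemif)
          simp at h2 h2b h3 hsemif hc1 hc2 hc3
          simp [h2, h2b, h3, hsemif, hc1, hc2, hc3]
        · rw [Bool.not_eq_true] at h3
          by_cases hc : (PySem.Str.endswith line "{" || PySem.Str.endswith line "}"
              || PySem.Str.endswith line "};") = true
          · have hcB : (PySem.Str.endswith line "}" || PySem.Str.endswith line "{"
                || PySem.Str.endswith line "};") = true := by
              rcases Bool.or_eq_true_iff.mp hc with h | h
              · rcases Bool.or_eq_true_iff.mp h with h' | h' <;> simp at h' <;> simp [h']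
              · simp at h
                simp [h]
            simp at h2 h2b h3 hc hcB
            simp [h2, h2b, h3, hc, hcB]
          · rw [Bool.not_eq_true] at hc
            simp at h2 h2b h3 hc
            by_cases h5 : PySem.Chars.endswith line.toList [';'] = true <;>
              simp [h2, h2b, h3, hc, h5]

lemma prepend_nil (gs : List (List String)) : prependFirst [] gs = gs := by
  cases gs <;> simp [prependFirst]

lemma consume_eq (t : List (Option String)) : ∀ cur, consume cur t = prependFirst cur (splitGroups t) := by
  induction t with
  | nil =>
    intro cur
    rw [splitGroups]
    simp [consume, prependFirst]
  | cons h t ih =>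
    cases h with
    | none =>
      intro cur
      conv_rhs => rw [splitGroups]
      rw [dif_pos (by simp)]
      simp only [consume, ih]
      cases hsg : splitGroups t <;> simp [prependFirst, hsg]
    | some x =>
      intro cur
      by_cases hm : (none : Option String) ∈ t
      · simp only [consume, ih]
        conv_lhs => rw [splitGroups]
        conv_rhs => rw [splitGroups]
        rw [dif_pos hm, dif_pos (by simp [hm])]
        have hidx : (some x :: t).idxOf (none : Option String) = t.idxOf none + 1 := by
          simp
        rw [hidx]
        simp [prependFirst, List.take_succ_cons, List.drop_succ_cons]
      · simp only [consume, ih]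
        conv_lhs => rw [splitGroups]
        conv_rhs => rw [splitGroups]
        rw [dif_neg hm, dif_neg (by simp [hm])]
        simp [prependFirst]

lemma foldB_stream (ls : List String) : ∀ init : List (Option String),
    ls.foldl (fun stream raw =>
      let r := classifyLine (PySem.Str.strip raw)
      stream ++ ((match r.1 with | some l => [some l] | none => [])
                 ++ (if r.2 then [(none : Option String)] else []))) init
    = init ++ ls.flatMap entryTok := by
  induction ls with
  | nil => intro init; simp
  | cons l ls ih =>
    intro init
    simp only [List.foldl_cons, List.flatMap_cons, ih]
    simp [entryTok]

def stepFold (st : List String × List (List String)) (raw : String) :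
    List String × List (List String) :=
  let r := classifyLine (PySem.Str.strip raw)
  let current_group := match r.1 with | some l => st.1 ++ [l] | none => st.1
  if r.2 then (([] : List String), st.2 ++ [current_group]) else (current_group, st.2)

lemma lamEq : (fun (st : List String × List (List String)) (rawLine : String) =>
      let line := PySem.Str.strip rawLine
      let r :=
        if PySem.Str.startswith line "///" then handle_comment line
        else if PySem.Str.endswith line ");" || PySem.Str.endswith line "const;" then
          handle_method_declaration line
        else if PySem.Str.endswith line ")" then handle_inline_defined_method line
        else if PySem.Str.endswith line "{" || PySem.Str.endswith line "}"
                || PySem.Str.endswith line "};" then handle_stray_curly line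
        else if PySem.Str.endswith line ";" then handle_field line
        else handle_misc line
      let current_group := match r.1 with | some l => st.1 ++ [l] | none => st.1
      if r.2 then (([] : List String), st.2 ++ [current_group]) else (current_group, st.2))
    = stepFold := by
  funext st rawLine
  dsimp only [stepFold]
  rw [stepEq]

lemma foldA (ls : List String) : ∀ (cur : List String) (groups : List (List String)),
    (ls.foldl stepFold (cur, groups)).2 = groups ++ consume cur (ls.flatMap entryTok) := by
  induction ls with
  | nil => intro cur groups; simp [consume]
  | cons l ls ih =>
    intro cur groups
    rcases hr : classifyLine (PySem.Str.strip l) with ⟨o, fl⟩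
    simp only [List.foldl_cons, List.flatMap_cons, stepFold, hr]
    cases o <;> cases fl <;> simp [entryTok, hr, ih, consume, List.append_assoc]

-- ===== VERDICT (by name: the statement is the Claim_ definition above) =====
theorem group_code_spec : Claim_equal_group_code := by
  intro rawCode _
  unfold Spec_group_code group_code group_code_alt
  rw [lamEq, foldB_stream, foldA, consume_eq, prepend_nil]
  simp
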